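-- pv_equiv track=rewrite | github.com/Radinyn/dependency_graph | dependency_graph.py | generate_dependence_sets
-- ===== SOURCE A (Python) =====
-- def generate_dependence_sets(instructions):
--     D = set()
--     I = set()
--
--     for i, (h0, *t0) in enumerate(instructions):
--         for j, (h1, *t1) in enumerate(instructions):
--             if (h0 in t1) or (h1 in t0):
--                 D.add((i, j))
--             else:
--                 I.add((i, j))
--
--     return D, I
-- ===== SOURCE B (Python) =====
-- def generate_dependence_sets(instructions):
--     # Inverted index: each symbol -> the set of instruction indices whose tail contains it.
--     tail_pairs = [(s, j) for j, ins in enumerate(instructions) for s in ins[1:]]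
--     index = {}
--     for s, j in tail_pairs:
--         index.setdefault(s, set()).add(j)
--     # Base relation head_i in tail_j, closed under symmetry.
--     base = [p for i, ins in enumerate(instructions)
--               for j in index.get(ins[0], ())
--               for p in ((i, j), (j, i))]
--     dep = set(base)
--     n = len(instructions)
--     D = set()
--     I = set()
--     for i in range(n):
--         for j in range(n):
--             if (i, j) in dep:
--                 D.add((i, j))
--             else:
--                 I.add((i, j))
--     return D, I
-- ===== Notes on version B (the rewrite author's own statement) =====
-- stated objective: faster
-- what changed: B builds an inverted index from each symbol to the instructions whose tail contains it, forms the dependent-pair set as the symmetric closure of the head-in-tail relation, and then classifies each ordered pair by one set-membership test instead of A's per-pair tail scans.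
import Mathlib
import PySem

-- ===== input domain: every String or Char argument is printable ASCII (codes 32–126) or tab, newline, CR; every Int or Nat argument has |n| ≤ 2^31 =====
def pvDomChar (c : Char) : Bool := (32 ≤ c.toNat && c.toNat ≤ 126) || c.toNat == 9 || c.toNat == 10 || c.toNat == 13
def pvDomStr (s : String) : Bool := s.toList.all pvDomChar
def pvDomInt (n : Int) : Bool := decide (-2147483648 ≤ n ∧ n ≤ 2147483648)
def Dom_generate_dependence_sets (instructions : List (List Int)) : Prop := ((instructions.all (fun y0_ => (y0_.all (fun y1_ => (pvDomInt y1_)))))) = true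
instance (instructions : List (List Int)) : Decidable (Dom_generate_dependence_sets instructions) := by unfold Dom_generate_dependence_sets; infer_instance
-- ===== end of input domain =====

-- B replaces A's per-pair tail scans by an inverted index (symbol → tail-owners) whose
-- symmetric closure is the dependent-pair set, then each pair is one membership query.

-- ===== PORT A =====
-- for i,(h0,*t0) in enumerate(instructions): for j,(h1,*t1) in …: D/I.add((i,j));
-- (h, *t) unpacking is head/tail: under Pre_ every row is nonempty, so pyGetD row 0 0 is the head
def generate_dependence_sets (instructions : List (List Int)) : (List (Int × Int)) × (List (Int × Int)) :=
  (PySem.List.enumerate instructions).foldl (fun DI p =>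
    (PySem.List.enumerate instructions).foldl (fun DI q =>
      if (q.2.drop 1).contains (PySem.List.pyGetD p.2 0 0)
         || (p.2.drop 1).contains (PySem.List.pyGetD q.2 0 0) then
        (PySem.Set.add DI.1 (p.1, q.1), DI.2)
      else
        (DI.1, PySem.Set.add DI.2 (p.1, q.1))) DI) ([], [])

-- ===== PORT B =====
def generate_dependence_sets_alt (instructions : List (List Int)) : (List (Int × Int)) × (List (Int × Int)) :=
  -- tail_pairs = [(s, j) for j, ins in enumerate(instructions) for s in ins[1:]]
  let tailPairs : List (Int × Int) :=
    (PySem.List.enumerate instructions).flatMap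
      (fun p => (PySem.List.slice p.2 (some 1)).map (fun s => (s, p.1)))
  -- for s, j in tail_pairs: index.setdefault(s, set()).add(j)
  let index : PySem.Dict Int (PySem.Set Int) :=
    tailPairs.foldl (fun d q => d.modify q.1 [] (fun t => PySem.Set.add t q.2)) PySem.Dict.empty
  -- base = [p for i, ins in … for j in index.get(ins[0], ()) for p in ((i,j),(j,i))]
  let base : List (Int × Int) :=
    (PySem.List.enumerate instructions).flatMap (fun p =>
      (index.getD (PySem.List.pyGetD p.2 0 0) []).flatMap (fun j => [(p.1, j), (j, p.1)]))
  -- dep = set(base)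
  let dep : PySem.Set (Int × Int) := PySem.Set.ofList base
  let n : Int := PySem.List.len instructions
  (PySem.List.pyRange 0 n).foldl (fun DI i =>
    (PySem.List.pyRange 0 n).foldl (fun DI j =>
      if dep.contains (i, j) then (PySem.Set.add DI.1 (i, j), DI.2)
      else (DI.1, PySem.Set.add DI.2 (i, j))) DI) ([], [])

-- ===== PRECONDITION & SPEC =====
-- Pre_ excludes inputs containing an empty instruction: there A's unpacking 'h0, *t0'
-- raises ValueError (and B's 'ins[0]' raises IndexError); A returns on all other inputs.
def Pre_generate_dependence_sets (instructions : List (List Int)) : Prop :=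
  ∀ ins ∈ instructions, ins ≠ []
instance (instructions : List (List Int)) : Decidable (Pre_generate_dependence_sets instructions) := by unfold Pre_generate_dependence_sets; infer_instance
def pvWitness_generate_dependence_sets : List (List Int) := [[1, 2], [2], [3, 1]]
def Spec_generate_dependence_sets (instructions : List (List Int)) (out : (List (Int × Int)) × (List (Int × Int))) : Prop := out = generate_dependence_sets_alt instructions
instance (instructions : List (List Int)) (out : (List (Int × Int)) × (List (Int × Int))) : Decidable (Spec_generate_dependence_sets instructions out) := by unfold Spec_generate_dependence_sets; infer_instance

-- ===== CLAIM (what is proved, stated in full; the proofs are below) =====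
def Claim_equal_generate_dependence_sets : Prop := ∀ (instructions : List (List Int)), Dom_generate_dependence_sets instructions → Pre_generate_dependence_sets instructions → Spec_generate_dependence_sets instructions (generate_dependence_sets instructions)

-- ===== LEMMAS AND PROOFS =====

-- Names for the intermediate values of B's port (proof-side only; B's lets are these by rfl).
def pvTailPairs (L : List (List Int)) : List (Int × Int) :=
  (PySem.List.enumerate L).flatMap
    (fun p => (PySem.List.slice p.2 (some 1)).map (fun s => (s, p.1)))

def pvIndex (L : List (List Int)) : PySem.Dict Int (PySem.Set Int) :=
  (pvTailPairs L).foldl (fun d q => d.modify q.1 [] (fun t => PySem.Set.add t q.2)) PySem.Dict.empty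

def pvBase (L : List (List Int)) : List (Int × Int) :=
  (PySem.List.enumerate L).flatMap (fun p =>
    ((pvIndex L).getD (PySem.List.pyGetD p.2 0 0) []).flatMap (fun j => [(p.1, j), (j, p.1)]))

theorem pv_alt_eq (L : List (List Int)) :
    generate_dependence_sets_alt L =
      (PySem.List.pyRange 0 (PySem.List.len L)).foldl (fun DI i =>
        (PySem.List.pyRange 0 (PySem.List.len L)).foldl (fun DI j =>
          if (PySem.Set.ofList (pvBase L)).contains (i, j) then (PySem.Set.add DI.1 (i, j), DI.2)
          else (DI.1, PySem.Set.add DI.2 (i, j))) DI) ([], []) := rfl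

theorem pv_slice_one (xs : List Int) : PySem.List.slice xs (some 1) = xs.drop 1 := by
  rw [PySem.List.slice_from xs (by norm_num)]; rfl

theorem pv_mem_tailPairs (L : List (List Int)) (s j : Int) :
    (s, j) ∈ pvTailPairs L ↔ ∃ b : Nat, ∃ _ : b < L.length, j = b ∧ s ∈ L[b].drop 1 := by
  simp only [pvTailPairs, List.mem_flatMap, PySem.List.mem_enumerate_iff, pv_slice_one,
    List.mem_map]
  constructor
  · rintro ⟨p, ⟨b, hb, rfl⟩, x, hx, hsj⟩
    simp only [Prod.mk.injEq] at hsj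
    exact ⟨b, hb, by simpa using hsj.2.symm, by simpa [← hsj.1] using hx⟩
  · rintro ⟨b, hb, rfl, hs⟩
    exact ⟨(b, L[b]), ⟨b, hb, by simp⟩, s, hs, rfl⟩

-- Invariant of the index-building loop: lookups collect exactly the pairs seen so far.
theorem pv_getD_foldl_modify_add (l : List (Int × Int)) (d : PySem.Dict Int (PySem.Set Int))
    (s j : Int) :
    j ∈ (l.foldl (fun d q => d.modify q.1 [] (fun t => PySem.Set.add t q.2)) d).getD s [] ↔
      j ∈ d.getD s [] ∨ (s, j) ∈ l := by
  induction l generalizing d with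
  | nil => simp
  | cons q t ih =>
    rw [List.foldl_cons, ih, PySem.Dict.getD_modify]
    by_cases hq : s = q.1
    · subst hq
      simp [PySem.Set.mem_add, or_assoc, Prod.ext_iff, eq_comm]
    · have : (s, j) = q ↔ False := by
        simp only [iff_false]; intro h; exact hq (by rw [← h])
      simp [hq, this]

theorem pv_mem_index (L : List (List Int)) (s j : Int) :
    j ∈ (pvIndex L).getD s [] ↔ (s, j) ∈ pvTailPairs L := by
  rw [pvIndex, pv_getD_foldl_modify_add]
  simp

theorem pv_mem_base (L : List (List Int)) (x : Int × Int) :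
    x ∈ pvBase L ↔ ∃ a : Nat, ∃ _ : a < L.length, ∃ b : Nat, ∃ _ : b < L.length,
      L[a].getD 0 0 ∈ L[b].drop 1 ∧ (x = ((a : Int), (b : Int)) ∨ x = ((b : Int), (a : Int))) := by
  simp only [pvBase, List.mem_flatMap, PySem.List.mem_enumerate_iff]
  constructor
  · rintro ⟨p, ⟨a, ha, rfl⟩, j, hj, hx⟩
    rw [pv_mem_index, pv_mem_tailPairs] at hj
    obtain ⟨b, hb, rfl, hs⟩ := hj
    refine ⟨a, ha, b, hb, by simpa [PySem.List.pyGetD_zero] using hs, ?_⟩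
    simpa using hx
  · rintro ⟨a, ha, b, hb, hs, hx⟩
    refine ⟨(a, L[a]), ⟨a, ha, by simp⟩, (b : Int), ?_, by simpa using hx⟩
    rw [pv_mem_index, pv_mem_tailPairs]
    exact ⟨b, hb, rfl, by simpa [PySem.List.pyGetD_zero] using hs⟩

theorem pv_dep_contains (L : List (List Int)) (a b : Nat) (ha : a < L.length) (hb : b < L.length) :
    (PySem.Set.ofList (pvBase L)).contains ((a : Int), (b : Int)) =
      ((L[b].drop 1).contains (L[a].getD 0 0) || (L[a].drop 1).contains (L[b].getD 0 0)) := by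
  rcases h : ((L[b].drop 1).contains (L[a].getD 0 0) || (L[a].drop 1).contains (L[b].getD 0 0)) with _ | _
  · simp only [Bool.or_eq_false_iff, List.contains_eq_mem, decide_eq_false_iff_not] at h
    rw [Bool.eq_false_iff]
    intro hc
    rw [PySem.Set.contains_iff, PySem.Set.mem_ofList, pv_mem_base] at hc
    obtain ⟨a', ha', b', hb', hs, hx⟩ := hc
    rcases hx with hx | hx <;>
      · obtain ⟨h1, h2⟩ := Prod.mk.injEq .. ▸ hx
        rw [Int.natCast_inj] at h1 h2
        subst h1; subst h2
        simp_all
  · simp only [Bool.or_eq_true, List.contains_eq_mem, decide_eq_true_eq] at h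
    rw [PySem.Set.contains_iff, PySem.Set.mem_ofList, pv_mem_base]
    rcases h with h | h
    · exact ⟨a, ha, b, hb, h, Or.inl rfl⟩
    · exact ⟨b, hb, a, ha, h, Or.inr rfl⟩

-- ===== VERDICT (by name: the statement is the Claim_ definition above) =====
theorem generate_dependence_sets_spec : Claim_equal_generate_dependence_sets := by
  intro L _ _
  unfold Spec_generate_dependence_sets
  rw [pv_alt_eq, generate_dependence_sets,
    PySem.List.enumerate_eq_map_pyRange L ([] : List Int), List.foldl_map]
  refine PySem.List.foldl_congr_mem _ _ _ _ ?_
  intro DI i hi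
  rw [List.foldl_map]
  refine PySem.List.foldl_congr_mem _ _ _ _ ?_
  intro DI' j hj
  rw [PySem.List.mem_pyRange_one] at hi hj
  obtain ⟨a, rfl⟩ : ∃ a : Nat, i = (a : Int) := ⟨i.toNat, (Int.toNat_of_nonneg hi.1).symm⟩
  obtain ⟨b, rfl⟩ : ∃ b : Nat, j = (b : Int) := ⟨j.toNat, (Int.toNat_of_nonneg hj.1).symm⟩
  have ha : a < L.length := by
    have := hi.2; rw [PySem.List.len_eq] at this; exact_mod_cast this
  have hb : b < L.length := by
    have := hj.2; rw [PySem.List.len_eq] at this; exact_mod_cast this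
  rw [pv_dep_contains L a b ha hb]
  simp [PySem.List.pyGetD_natCast, PySem.List.pyGetD_zero, List.getD_eq_getElem?_getD,
    ha, hb]
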